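-- pv_equiv track=rewrite | github.com/XDhajko/Webserverseclab | agent/agent_payloads/internal_agent.py | parse_worker_user
-- ===== SOURCE A (Python) =====
-- def parse_worker_user(ps_output: str) -> str:
--     seen = []
--     for line in ps_output.splitlines():
--         lower = line.lower()
--         if not any(x in lower for x in ["apache2", "httpd", "nginx", "lshttpd"]):
--             continue
--         parts = line.split()
--         if not parts:
--             continue
--         user = parts[0]
--         if user not in seen:
--             seen.append(user)
--         # Prefer non-root worker processes over master/root processes.
--         if user != "root" and ("worker" in lower or "apache2" in lower or "lshttpd" in lower):
--             return user
--
--     for user in seen: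
--         if user != "root":
--             return user
--     if seen:
--         return seen[0]
--     return "unknown"
-- ===== SOURCE B (Python) =====
-- def parse_worker_user(ps_output: str) -> str:
--     # Single full scan selecting the minimum-priority (earliest) candidate:
--     # 0 = non-root worker/apache2/lshttpd hit, 1 = non-root, 2 = root.
--     # No dedup list, no early return, no fallback loops.
--     best = (3, "unknown")
--     for line in ps_output.splitlines():
--         lower = line.lower()
--         if any(k in lower for k in ("apache2", "httpd", "nginx", "lshttpd")):
--             parts = line.split()
--             if parts:
--                 user = parts[0]
--                 if user != "root" and ("worker" in lower or "apache2" in lower or "lshttpd" in lower):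
--                     prio = 0
--                 elif user != "root":
--                     prio = 1
--                 else:
--                     prio = 2
--                 if prio < best[0]:
--                     best = (prio, user)
--     return best[1]
-- ===== Notes on version B (the rewrite author's own statement) =====
-- stated objective: simpler
-- what changed: Replaces A's interleaved early-exit loop with a dedup list of users and two fallback loops by a single full scan that ranks each matching line's user with a 3-level priority and keeps the minimum-priority earliest candidate in one accumulator; the dedup list and both fallback loops disappear.
import Mathlib
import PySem

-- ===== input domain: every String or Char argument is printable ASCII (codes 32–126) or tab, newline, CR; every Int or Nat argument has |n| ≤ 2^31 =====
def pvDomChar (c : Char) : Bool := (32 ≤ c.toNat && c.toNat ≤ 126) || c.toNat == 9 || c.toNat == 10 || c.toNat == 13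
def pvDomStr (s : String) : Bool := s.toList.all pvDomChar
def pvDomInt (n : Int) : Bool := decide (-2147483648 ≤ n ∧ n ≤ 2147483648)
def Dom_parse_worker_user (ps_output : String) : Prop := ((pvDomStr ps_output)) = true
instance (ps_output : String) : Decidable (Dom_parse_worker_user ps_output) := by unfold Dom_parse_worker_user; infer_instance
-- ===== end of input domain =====

-- B replaces the early-exit loop + dedup list + two fallback loops by one full
-- min-priority scan with a single accumulator; same values everywhere.

-- ===== PORT A =====
-- 'any(x in lower for x in [...])' written out as the disjunction over the four literals
def pvA_kw (lower : String) : Bool :=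
  PySem.Str.isIn "apache2" lower || PySem.Str.isIn "httpd" lower ||
  PySem.Str.isIn "nginx" lower || PySem.Str.isIn "lshttpd" lower

def pvA_hit (user lower : String) : Bool :=
  user != "root" && (PySem.Str.isIn "worker" lower || PySem.Str.isIn "apache2" lower ||
    PySem.Str.isIn "lshttpd" lower)

-- the second loop: 'for user in seen: if user != "root": return user'
def pvA_fallback : List String → Option String
  | [] => none
  | u :: rest => if u != "root" then some u else pvA_fallback rest

-- after the main loop: fallback scan, then seen[0], then "unknown"
def pvA_final (seen : List String) : String :=
  match pvA_fallback seen with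
  | some u => u
  | none =>
    match seen with
    | u0 :: _ => u0
    | [] => "unknown"

-- the main for-loop over splitlines, carrying 'seen'
def pvA_loop : List String → List String → String
  | [], seen => pvA_final seen
  | line :: rest, seen =>
    let lower := PySem.Str.lower line
    if !pvA_kw lower then pvA_loop rest seen
    else
      match PySem.Str.split₀ line with
      | [] => pvA_loop rest seen
      | user :: _ =>
        let seen' := if seen.contains user then seen else seen ++ [user]
        if pvA_hit user lower then user else pvA_loop rest seen'

def parse_worker_user (ps_output : String) : String :=
  pvA_loop (PySem.Str.splitlines ps_output) []

-- ===== PORT B =====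
def pvB_kw (lower : String) : Bool :=
  PySem.Str.isIn "apache2" lower || PySem.Str.isIn "httpd" lower ||
  PySem.Str.isIn "nginx" lower || PySem.Str.isIn "lshttpd" lower

-- the priority if/elif/else chain of Source B
def pvB_prio (user lower : String) : Nat :=
  if user != "root" && (PySem.Str.isIn "worker" lower || PySem.Str.isIn "apache2" lower ||
      PySem.Str.isIn "lshttpd" lower) then 0
  else if user != "root" then 1
  else 2

-- one iteration of Source B's loop body, updating the single 'best' accumulator
def pvB_step (best : Nat × String) (line : String) : Nat × String :=
  if pvB_kw (PySem.Str.lower line) then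
    match PySem.Str.split₀ line with
    | [] => best
    | user :: _ =>
      if pvB_prio user (PySem.Str.lower line) < best.1
        then (pvB_prio user (PySem.Str.lower line), user) else best
  else best

def parse_worker_user_alt (ps_output : String) : String :=
  ((PySem.Str.splitlines ps_output).foldl pvB_step (3, "unknown")).2

-- ===== PRECONDITION & SPEC =====
def Spec_parse_worker_user (ps_output : String) (out : String) : Prop := out = parse_worker_user_alt ps_output
instance (ps_output : String) (out : String) : Decidable (Spec_parse_worker_user ps_output out) := by unfold Spec_parse_worker_user; infer_instance

-- ===== CLAIM (what is proved, stated in full; the proofs are below) =====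
def Claim_equal_parse_worker_user : Prop := ∀ (ps_output : String), Dom_parse_worker_user ps_output → Spec_parse_worker_user ps_output (parse_worker_user ps_output)

-- ===== LEMMAS AND PROOFS =====

-- the 'best' accumulator that summarises A's 'seen' list
def pvFinalBest (seen : List String) : Nat × String :=
  match seen.find? (fun u => u != "root") with
  | some u => (1, u)
  | none =>
    match seen with
    | [] => (3, "unknown")
    | u0 :: _ => (2, u0)

theorem pvA_fallback_eq_find? (l : List String) :
    pvA_fallback l = l.find? (fun u => u != "root") := by
  induction l with
  | nil => rfl
  | cons u rest ih =>
    cases h : (u != "root") <;> simp [pvA_fallback, List.find?, h, ih]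

theorem pvA_final_eq (seen : List String) : pvA_final seen = (pvFinalBest seen).2 := by
  unfold pvA_final pvFinalBest
  rw [pvA_fallback_eq_find?]
  cases h : seen.find? (fun u => u != "root") with
  | some u => rfl
  | none => cases seen <;> rfl

theorem pvFinalBest_pos (seen : List String) : 0 < (pvFinalBest seen).1 := by
  unfold pvFinalBest
  cases h : seen.find? (fun u => u != "root") with
  | some u => exact Nat.one_pos
  | none => cases seen <;> simp

-- once best has priority 0 the rest of B's fold keeps it
theorem pvB_foldl_zero (lines : List String) (u : String) :
    lines.foldl pvB_step (0, u) = (0, u) := by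
  induction lines with
  | nil => rfl
  | cons line rest ih =>
    have hstep : pvB_step (0, u) line = (0, u) := by
      unfold pvB_step
      by_cases hk : pvB_kw (PySem.Str.lower line) = true
      · cases hsp : PySem.Str.split₀ line with
        | nil => simp [hk]
        | cons user t => simp [hk]
      · simp [hk]
    simp [List.foldl, hstep, ih]

-- pvB_prio's first branch is exactly pvA_hit's test
theorem pvB_prio_eq (user lower : String) :
    pvB_prio user lower
      = if pvA_hit user lower then 0 else if user != "root" then 1 else 2 := rfl

-- A's 'seen' update corresponds to B's min-priority update (non-hit case)
theorem pvFinalBest_add (seen : List String) (u : String) :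
    pvFinalBest (if seen.contains u then seen else seen ++ [u]) =
      if (if u != "root" then 1 else 2) < (pvFinalBest seen).1
        then ((if u != "root" then 1 else 2), u) else pvFinalBest seen := by
  cases hf : seen.find? (fun x => x != "root") with
  | some u0 =>
    have hb : pvFinalBest seen = (1, u0) := by unfold pvFinalBest; rw [hf]
    have hlt : ¬ ((if u != "root" then 1 else 2) < 1) := by
      by_cases h : (u != "root") = true <;> simp [h]
    rw [hb, if_neg hlt]
    by_cases hc : seen.contains u = true
    · rw [if_pos hc]; unfold pvFinalBest; rw [hf]
    · have hfind : (seen ++ [u]).find? (fun x => x != "root") = some u0 := by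
        rw [List.find?_append, hf]; rfl
      rw [if_neg hc]; unfold pvFinalBest; rw [hfind]
  | none =>
    have hall : ∀ x ∈ seen, x = "root" := by
      intro x hx
      have := List.find?_eq_none.mp hf x hx
      simpa using this
    cases seen with
    | nil =>
      unfold pvFinalBest
      by_cases h : (u != "root") = true <;>
        simp [List.find?, h]
    | cons u0 rest =>
      have hb : pvFinalBest (u0 :: rest) = (2, u0) := by unfold pvFinalBest; rw [hf]
      rw [hb]
      by_cases h : (u != "root") = true
      · -- u is non-root, hence absent from the all-root 'seen'
        have hm : u ∉ u0 :: rest := by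
          intro hmem
          have := hall u hmem
          simp [this] at h
        have hfind : (u0 :: (rest ++ [u])).find? (fun x => x != "root") = some u := by
          rw [← List.cons_append, List.find?_append, hf]
          simp [List.find?, h]
        have hc : (u0 :: rest).contains u = false := by simpa using hm
        rw [if_neg (by simp only [hc]; exact Bool.false_ne_true)]
        rw [if_pos (by simp [h] : (if u != "root" then 1 else 2) < 2)]
        show pvFinalBest (u0 :: (rest ++ [u])) = _
        unfold pvFinalBest
        rw [hfind]
        simp [h]
      · -- u = "root": appending it changes neither find? nor the head
        have hu : (u != "root") = false := by simpa using h
        rw [if_neg (by simp [hu] : ¬ ((if u != "root" then 1 else 2) < 2))]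
        by_cases hc : (u0 :: rest).contains u = true
        · rw [if_pos hc]; exact hb
        · rw [if_neg hc]
          have hfind : (u0 :: (rest ++ [u])).find? (fun x => x != "root") = none := by
            rw [← List.cons_append, List.find?_append, hf]
            simp [List.find?, hu]
          show pvFinalBest (u0 :: (rest ++ [u])) = _
          unfold pvFinalBest
          rw [hfind]

-- main invariant: A's loop from 'seen' equals B's fold from the summarised best
theorem pvA_loop_eq (lines : List String) : ∀ seen : List String,
    pvA_loop lines seen = (lines.foldl pvB_step (pvFinalBest seen)).2 := by
  induction lines with
  | nil => intro seen; simpa [List.foldl] using pvA_final_eq seen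
  | cons line rest ih =>
    intro seen
    have hkw : pvB_kw (PySem.Str.lower line) = pvA_kw (PySem.Str.lower line) := rfl
    by_cases hk : pvA_kw (PySem.Str.lower line) = true
    · cases hsp : PySem.Str.split₀ line with
      | nil =>
        have hstep : pvB_step (pvFinalBest seen) line = pvFinalBest seen := by
          unfold pvB_step; rw [hkw, if_pos hk, hsp]
        simp only [List.foldl, hstep]
        simp only [pvA_loop, hk, hsp, Bool.not_true, Bool.false_eq_true, if_false]
        exact ih seen
      | cons user t =>
        by_cases hh : pvA_hit user (PySem.Str.lower line) = true
        · -- priority-0 hit: A returns, B locks best at (0, user)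
          have hprio : pvB_prio user (PySem.Str.lower line) = 0 := by
            rw [pvB_prio_eq, if_pos hh]
          have hstep : pvB_step (pvFinalBest seen) line = (0, user) := by
            unfold pvB_step
            rw [hkw, if_pos hk, hsp]
            show (if pvB_prio user (PySem.Str.lower line) < (pvFinalBest seen).1
              then (pvB_prio user (PySem.Str.lower line), user) else pvFinalBest seen) = (0, user)
            rw [hprio, if_pos (pvFinalBest_pos seen)]
          simp only [List.foldl, hstep, pvB_foldl_zero]
          simp [pvA_loop, hk, hsp, hh]
        · have hh' : pvA_hit user (PySem.Str.lower line) = false := by simpa using hh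
          have hprio : pvB_prio user (PySem.Str.lower line)
              = (if user != "root" then 1 else 2) := by
            rw [pvB_prio_eq, hh']; simp
          have hstep : pvB_step (pvFinalBest seen) line
              = pvFinalBest (if seen.contains user then seen else seen ++ [user]) := by
            unfold pvB_step
            rw [hkw, if_pos hk, hsp]
            show (if pvB_prio user (PySem.Str.lower line) < (pvFinalBest seen).1
              then (pvB_prio user (PySem.Str.lower line), user) else pvFinalBest seen) = _
            rw [hprio]
            exact (pvFinalBest_add seen user).symm
          simp only [List.foldl, hstep]
          have hA : pvA_loop (line :: rest) seen
              = pvA_loop rest (if seen.contains user then seen else seen ++ [user]) := by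
            simp [pvA_loop, hk, hsp, hh']
          rw [hA]
          exact ih _
    · have hk' : pvA_kw (PySem.Str.lower line) = false := by simpa using hk
      have hstep : pvB_step (pvFinalBest seen) line = pvFinalBest seen := by
        unfold pvB_step; rw [hkw, hk']; simp
      simp only [List.foldl, hstep]
      have hA : pvA_loop (line :: rest) seen = pvA_loop rest seen := by
        simp [pvA_loop, hk']
      rw [hA]; exact ih seen

-- ===== VERDICT (by name: the statement is the Claim_ definition above) =====
theorem parse_worker_user_spec : Claim_equal_parse_worker_user := by
  intro ps _
  unfold Spec_parse_worker_user parse_worker_user parse_worker_user_alt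
  rw [pvA_loop_eq]
  rfl
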